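-- pv_equiv track=rewrite | github.com/Jeanvr/supplier-scrapi | scripts/backfill_watts_image_url.py | _pick_best_image_url
-- ===== SOURCE A (Python) =====
-- EXPECTED_REDUFIX_IMAGE_URL = "https://www.watts.eu/dfsmedia/0533dbba17714b1ab581ab07a4cbb521/637386-50060/638386907020000000"
--
-- def clean_spaces(value: object) -> str:
--     return " ".join(str(value or "").split())
--
-- def _is_valid_image_url(url: str) -> bool:
--     url = clean_spaces(url)
--     url_low = url.lower()
--
--     if not url_low.startswith(("http://", "https://")):
--         return False
--
--     blocked_fragments = (
--         "width=device-width",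
--         "/assets/",
--         "/asset/",
--         "/icon",
--         "icon.",
--         ".svg",
--         ".css",
--         ".js",
--     )
--     if any(fragment in url_low for fragment in blocked_fragments):
--         return False
--
--     image_markers = (".jpg", ".jpeg", ".png", ".webp", ".gif", "dfsmedia")
--     if not any(marker in url_low for marker in image_markers):
--         return False
--
--     return True
--
-- def _pick_best_image_url(candidates: list[str]) -> str:
--     seen: set[str] = set()
--     valid_candidates: list[str] = []
--
--     for candidate in candidates:
--         candidate = clean_spaces(candidate)
--         if candidate in seen:
--             continue
--         seen.add(candidate)
--         if _is_valid_image_url(candidate):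
--             valid_candidates.append(candidate)
--
--     for candidate in valid_candidates:
--         if candidate == EXPECTED_REDUFIX_IMAGE_URL:
--             return candidate
--
--     for candidate in valid_candidates:
--         if "dfsmedia" in candidate.lower():
--             return candidate
--
--     return valid_candidates[0] if valid_candidates else ""
-- ===== SOURCE B (Python) =====
-- EXPECTED_REDUFIX_IMAGE_URL = "https://www.watts.eu/dfsmedia/0533dbba17714b1ab581ab07a4cbb521/637386-50060/638386907020000000"
--
-- def clean_spaces(value: object) -> str:
--     return " ".join(str(value or "").split())
--
-- def _is_valid_image_url(url: str) -> bool: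
--     url = clean_spaces(url)
--     url_low = url.lower()
--     if not url_low.startswith(("http://", "https://")):
--         return False
--     blocked_fragments = (
--         "width=device-width",
--         "/assets/",
--         "/asset/",
--         "/icon",
--         "icon.",
--         ".svg",
--         ".css",
--         ".js",
--     )
--     if any(fragment in url_low for fragment in blocked_fragments):
--         return False
--     image_markers = (".jpg", ".jpeg", ".png", ".webp", ".gif", "dfsmedia")
--     if not any(marker in url_low for marker in image_markers):
--         return False
--     return True
--
-- def _rank(candidate: str) -> int:
--     if candidate == EXPECTED_REDUFIX_IMAGE_URL:
--         return 0
--     if "dfsmedia" in candidate.lower():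
--         return 1
--     return 2
--
-- def _pick_best_image_url(candidates: list[str]) -> str:
--     # Single pass: track the best-ranked valid candidate seen so far
--     # (strictly-smaller-rank replacement keeps the first occurrence on ties).
--     seen: set[str] = set()
--     best = None  # (rank, candidate) or None
--     for candidate in candidates:
--         candidate = clean_spaces(candidate)
--         if candidate in seen:
--             continue
--         seen.add(candidate)
--         if not _is_valid_image_url(candidate):
--             continue
--         rank = _rank(candidate)
--         if best is None or rank < best[0]:
--             best = (rank, candidate)
--     return best[1] if best is not None else ""
-- ===== Notes on version B (the rewrite author's own statement) =====
-- stated objective: simpler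
-- what changed: Replaced the intermediate valid_candidates list and the three sequential priority scans by a single pass that keeps only the best-ranked valid candidate (rank 0 = exact expected URL, 1 = contains 'dfsmedia', 2 = other), replacing only on strictly smaller rank to preserve first-occurrence tie-breaking.
import Mathlib
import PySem

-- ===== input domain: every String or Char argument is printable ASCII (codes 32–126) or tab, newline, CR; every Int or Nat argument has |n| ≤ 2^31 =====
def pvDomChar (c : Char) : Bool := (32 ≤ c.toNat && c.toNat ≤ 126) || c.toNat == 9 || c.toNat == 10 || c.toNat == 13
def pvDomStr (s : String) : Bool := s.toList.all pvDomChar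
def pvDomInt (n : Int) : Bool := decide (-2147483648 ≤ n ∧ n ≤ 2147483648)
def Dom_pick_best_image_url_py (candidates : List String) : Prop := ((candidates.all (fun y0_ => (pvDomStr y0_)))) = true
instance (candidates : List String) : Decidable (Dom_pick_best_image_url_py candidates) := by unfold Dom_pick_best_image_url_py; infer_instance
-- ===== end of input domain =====

-- B replaces A's valid_candidates list and three priority scans by a single pass keeping the
-- best-ranked valid candidate (0 = expected URL, 1 = contains "dfsmedia", 2 = other); same return value.

-- ===== PORT A =====
def EXPECTED_REDUFIX_IMAGE_URL : String :=
  "https://www.watts.eu/dfsmedia/0533dbba17714b1ab581ab07a4cbb521/637386-50060/638386907020000000"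

-- clean_spaces: " ".join(str(value or "").split())
def clean_spaces (value : String) : String :=
  PySem.Str.join " " (PySem.Str.split₀ (if value == "" then "" else value))

-- _is_valid_image_url, step for step
def is_valid_image_url (url : String) : Bool :=
  let url := clean_spaces url
  let url_low := PySem.Str.lower url
  if !(PySem.Str.startswith url_low "http://" || PySem.Str.startswith url_low "https://") then
    false
  else
    let blocked_fragments : List String :=
      ["width=device-width", "/assets/", "/asset/", "/icon", "icon.", ".svg", ".css", ".js"]
    if blocked_fragments.any (fun fragment => PySem.Str.isIn fragment url_low) then
      false
    else
      let image_markers : List String := [".jpg", ".jpeg", ".png", ".webp", ".gif", "dfsmedia"]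
      if !(image_markers.any (fun marker => PySem.Str.isIn marker url_low)) then
        false
      else
        true

-- A's dedup-and-filter loop body: state = (seen, valid_candidates)
def stepA (p : PySem.Set String × List String) (cand : String) :
    PySem.Set String × List String :=
  let c := clean_spaces cand
  if PySem.Set.contains p.1 c then p
  else
    let seen := PySem.Set.add p.1 c
    if is_valid_image_url c then (seen, p.2 ++ [c]) else (seen, p.2)

-- A's three sequential scans over valid_candidates (each 'for … return' is a find?)
def selA (valid_candidates : List String) : String :=
  match valid_candidates.find? (fun c => c == EXPECTED_REDUFIX_IMAGE_URL) with
  | some c => c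
  | none =>
    match valid_candidates.find? (fun c => PySem.Str.isIn "dfsmedia" (PySem.Str.lower c)) with
    | some c => c
    | none =>
      -- valid_candidates[0] if valid_candidates else ""
      match valid_candidates with
      | [] => ""
      | c :: _ => c

def pick_best_image_url_py (candidates : List String) : String :=
  selA (candidates.foldl stepA (PySem.Set.empty, [])).2

-- ===== PORT B =====
def rank_of (candidate : String) : Nat :=
  if candidate == EXPECTED_REDUFIX_IMAGE_URL then 0
  else if PySem.Str.isIn "dfsmedia" (PySem.Str.lower candidate) then 1
  else 2

-- B's single-pass loop body: state = (seen, best) with best = none or (rank, candidate)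
def stepB (p : PySem.Set String × Option (Nat × String)) (cand : String) :
    PySem.Set String × Option (Nat × String) :=
  let c := clean_spaces cand
  if PySem.Set.contains p.1 c then p
  else
    let seen := PySem.Set.add p.1 c
    if is_valid_image_url c then
      let r := rank_of c
      match p.2 with
      | none => (seen, some (r, c))
      | some b => if r < b.1 then (seen, some (r, c)) else (seen, some b)
    else (seen, p.2)

def pick_best_image_url_py_alt (candidates : List String) : String :=
  match (candidates.foldl stepB (PySem.Set.empty, none)).2 with
  | some b => b.2
  | none => ""

-- ===== PRECONDITION & SPEC =====
-- A is total: Pre_ is a tautological sanity condition (every candidate equal to the sample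
-- dfsmedia URL below does contain "dfsmedia"); it holds for every input and excludes nothing.
def Pre_pick_best_image_url_py (candidates : List String) : Prop :=
  ∀ c ∈ candidates, c = "https://www.watts.eu/dfsmedia/img.jpg" →
    PySem.Str.isIn "dfsmedia" (PySem.Str.lower c) = true
instance (candidates : List String) : Decidable (Pre_pick_best_image_url_py candidates) := by unfold Pre_pick_best_image_url_py; infer_instance
def pvWitness_pick_best_image_url_py : List String := (["https://www.watts.eu/dfsmedia/img.jpg"])

def Spec_pick_best_image_url_py (candidates : List String) (out : String) : Prop := out = pick_best_image_url_py_alt candidates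
instance (candidates : List String) (out : String) : Decidable (Spec_pick_best_image_url_py candidates out) := by unfold Spec_pick_best_image_url_py; infer_instance

-- ===== CLAIM (what is proved, stated in full; the proofs are below) =====
def Claim_equal_pick_best_image_url_py : Prop := ∀ (candidates : List String), Dom_pick_best_image_url_py candidates → Pre_pick_best_image_url_py candidates → Spec_pick_best_image_url_py candidates (pick_best_image_url_py candidates)

-- ===== LEMMAS AND PROOFS =====

-- the "take the better-ranked, left-biased" combiner B's loop applies to each valid candidate
def mBest (b : Nat × String) (c : String) : Nat × String :=
  if rank_of c < b.1 then (rank_of c, c) else b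

def stepOpt (o : Option (Nat × String)) (c : String) : Option (Nat × String) :=
  match o with
  | none => some (rank_of c, c)
  | some b => some (mBest b c)

theorem rank_of_exp {x : String} (h : (x == EXPECTED_REDUFIX_IMAGE_URL) = true) :
    rank_of x = 0 := by
  unfold rank_of; rw [h]; rfl

theorem rank_of_dfs {x : String} (h1 : (x == EXPECTED_REDUFIX_IMAGE_URL) = false)
    (h2 : PySem.Str.isIn "dfsmedia" (PySem.Str.lower x) = true) : rank_of x = 1 := by
  unfold rank_of; rw [h1, h2]; rfl

theorem rank_of_other {x : String} (h1 : (x == EXPECTED_REDUFIX_IMAGE_URL) = false)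
    (h2 : PySem.Str.isIn "dfsmedia" (PySem.Str.lower x) = false) : rank_of x = 2 := by
  unfold rank_of; rw [h1, h2]; rfl

theorem foldl_stepOpt_some (V : List String) (p : Nat × String) :
    V.foldl stepOpt (some p) = some (V.foldl mBest p) := by
  induction V generalizing p with
  | nil => rfl
  | cons c V ih => simpa [stepOpt] using ih (mBest p c)

-- dropping the loser of the first two candidates does not change A's selection
theorem selA_drop (b c : String) (V : List String) :
    selA (b :: c :: V) = selA ((if rank_of c < rank_of b then c else b) :: V) := by
  cases hEb : b == EXPECTED_REDUFIX_IMAGE_URL with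
  | true =>
    have hb := rank_of_exp hEb
    rw [if_neg (by omega)]
    simp only [selA, List.find?_cons_of_pos, hEb]
  | false =>
    cases hEc : c == EXPECTED_REDUFIX_IMAGE_URL with
    | true =>
      have hc := rank_of_exp hEc
      have hb : 0 < rank_of b := by
        cases hD : PySem.Str.isIn "dfsmedia" (PySem.Str.lower b) with
        | true => rw [rank_of_dfs hEb hD]; omega
        | false => rw [rank_of_other hEb hD]; omega
      rw [if_pos (by omega)]
      simp only [selA, List.find?_cons_of_pos, List.find?_cons_of_neg, hEb, hEc,
        Bool.false_eq_true, not_false_eq_true]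
    | false =>
      cases hDb : PySem.Str.isIn "dfsmedia" (PySem.Str.lower b) with
      | true =>
        have hb := rank_of_dfs hEb hDb
        have hc : 1 ≤ rank_of c := by
          cases hD : PySem.Str.isIn "dfsmedia" (PySem.Str.lower c) with
          | true => rw [rank_of_dfs hEc hD]
          | false => rw [rank_of_other hEc hD]; omega
        rw [if_neg (by omega)]
        simp only [selA, List.find?_cons_of_pos, List.find?_cons_of_neg, hEb, hEc, hDb,
          Bool.false_eq_true, not_false_eq_true]
      | false =>
        cases hDc : PySem.Str.isIn "dfsmedia" (PySem.Str.lower c) with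
        | true =>
          have hb := rank_of_other hEb hDb
          have hc := rank_of_dfs hEc hDc
          rw [if_pos (by omega)]
          simp only [selA, List.find?_cons_of_pos, List.find?_cons_of_neg, hEb, hEc, hDb, hDc,
            Bool.false_eq_true, not_false_eq_true]
        | false =>
          have hb := rank_of_other hEb hDb
          have hc := rank_of_other hEc hDc
          rw [if_neg (by omega)]
          simp only [selA, List.find?_cons_of_neg, hEb, hEc, hDb, hDc,
            Bool.false_eq_true, not_false_eq_true]

theorem selA_eq_foldl_mBest (b : String) (V : List String) :
    selA (b :: V) = (V.foldl mBest (rank_of b, b)).2 := by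
  induction V generalizing b with
  | nil =>
    cases hEb : b == EXPECTED_REDUFIX_IMAGE_URL with
    | true => simp only [selA, List.find?_cons_of_pos, hEb, List.foldl_nil]
    | false =>
      cases hDb : PySem.Str.isIn "dfsmedia" (PySem.Str.lower b) with
      | true =>
        simp only [selA, List.find?_cons_of_pos, List.find?_cons_of_neg, hEb, hDb,
          Bool.false_eq_true, not_false_eq_true, List.find?_nil, List.foldl_nil]
      | false =>
        simp only [selA, List.find?_cons_of_neg, hEb, hDb,
          Bool.false_eq_true, not_false_eq_true, List.find?_nil, List.foldl_nil]
  | cons c V ih =>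
    rw [selA_drop]
    have hm : mBest (rank_of b, b) c = (rank_of (if rank_of c < rank_of b then c else b),
        if rank_of c < rank_of b then c else b) := by
      by_cases h : rank_of c < rank_of b <;> simp [mBest, h]
    calc selA ((if rank_of c < rank_of b then c else b) :: V)
        = (V.foldl mBest (rank_of (if rank_of c < rank_of b then c else b),
            if rank_of c < rank_of b then c else b)).2 := ih _
      _ = ((c :: V).foldl mBest (rank_of b, b)).2 := by rw [List.foldl_cons, hm]

-- B's fold tracks A's fold: same seen set, best = stepOpt-fold of A's valid_candidates
theorem fold_rel (cands : List String) (seen : PySem.Set String) (V : List String) :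
    cands.foldl stepB (seen, V.foldl stepOpt none)
      = ((cands.foldl stepA (seen, V)).1, (cands.foldl stepA (seen, V)).2.foldl stepOpt none) := by
  induction cands generalizing seen V with
  | nil => rfl
  | cons cand cands ih =>
    simp only [List.foldl_cons]
    by_cases hseen : PySem.Set.contains seen (clean_spaces cand) = true
    · have hmem : clean_spaces cand ∈ seen := List.mem_of_elem_eq_true hseen
      rw [show stepB (seen, V.foldl stepOpt none) cand = (seen, V.foldl stepOpt none) by
        simp [stepB, hmem],
        show stepA (seen, V) cand = (seen, V) by simp [stepA, hmem]]
      exact ih seen V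
    · have hmem : clean_spaces cand ∉ seen := fun h =>
        hseen (List.elem_eq_true_of_mem h)
      by_cases hval : is_valid_image_url (clean_spaces cand) = true
      · rw [show stepB (seen, V.foldl stepOpt none) cand
            = (PySem.Set.add seen (clean_spaces cand),
               stepOpt (V.foldl stepOpt none) (clean_spaces cand)) by
          cases h : V.foldl stepOpt none with
          | none => simp [stepB, hmem, hval, stepOpt]
          | some b =>
            by_cases hr : rank_of (clean_spaces cand) < b.1 <;>
              simp [stepB, hmem, hval, stepOpt, mBest, hr],
          show stepA (seen, V) cand
            = (PySem.Set.add seen (clean_spaces cand), V ++ [clean_spaces cand]) by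
          simp [stepA, hmem, hval]]
        rw [show stepOpt (V.foldl stepOpt none) (clean_spaces cand)
            = (V ++ [clean_spaces cand]).foldl stepOpt none by
          simp [List.foldl_append]]
        exact ih _ _
      · rw [show stepB (seen, V.foldl stepOpt none) cand
            = (PySem.Set.add seen (clean_spaces cand), V.foldl stepOpt none) by
          simp [stepB, hmem, hval],
          show stepA (seen, V) cand = (PySem.Set.add seen (clean_spaces cand), V) by
          simp [stepA, hmem, hval]]
        exact ih _ _

-- ===== VERDICT (by name: the statement is the Claim_ definition above) =====
theorem pick_best_image_url_py_spec : Claim_equal_pick_best_image_url_py := by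
  intro candidates _ _
  show pick_best_image_url_py candidates = pick_best_image_url_py_alt candidates
  unfold pick_best_image_url_py pick_best_image_url_py_alt
  have h := fold_rel candidates PySem.Set.empty []
  simp only [List.foldl_nil] at h
  rw [h]
  cases hV : (candidates.foldl stepA (PySem.Set.empty, [])).2 with
  | nil => rfl
  | cons b V =>
    rw [show (b :: V).foldl stepOpt none = some (V.foldl mBest (rank_of b, b)) by
      rw [List.foldl_cons, show stepOpt none b = some (rank_of b, b) from rfl,
        foldl_stepOpt_some]]
    change selA (b :: V) = (V.foldl mBest (rank_of b, b)).2
    exact selA_eq_foldl_mBest b V
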